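-- pv_equiv track=rewrite | github.com/NorthPole0499/Algoritms_task_6 | 1_task.py | naivn
-- ===== SOURCE A (Python) =====
-- def max_dict(dictionary):
--     max_value = max(dictionary.values())
--     for k, v in dictionary.items():
--         if v == max_value:
--             max_key = k
--             break
--     return max_key, max_value
--
-- def naivn(string):
--     dictionary = dict()
--     for i in range(10, 100):
--         c = 0
--         a, b = str(i)[0], str(i)[1]
--         for j in range(1, len(string)):
--             if a == string[j - 1] and b == string[j]:
--                 c += 1
--         dictionary[i] = c
--
--     return max_dict(dictionary)
-- ===== SOURCE B (Python) =====
-- def naivn(string):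
--     counts = {}
--     for j in range(1, len(string)):
--         a, b = string[j - 1], string[j]
--         if '1' <= a <= '9' and '0' <= b <= '9':
--             p = 10 * (ord(a) - 48) + (ord(b) - 48)
--             counts[p] = counts.get(p, 0) + 1
--     best_k, best_v = 10, 0
--     for i in range(10, 100):
--         c = counts.get(i, 0)
--         if c > best_v:
--             best_k, best_v = i, c
--     return best_k, best_v
-- ===== Notes on version B (the rewrite author's own statement) =====
-- stated objective: faster
-- what changed: A scans the whole string once for each of the 90 candidate pairs (90 inner passes) and then takes max-of-values plus a first-key search; B makes a single pass over the string building a dict counting each adjacent digit pair (rejecting leading zeros), then one running-max sweep over 10..99 whose strict '>' keeps the first (smallest) key, reproducing A's tie-break.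
import Mathlib
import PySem

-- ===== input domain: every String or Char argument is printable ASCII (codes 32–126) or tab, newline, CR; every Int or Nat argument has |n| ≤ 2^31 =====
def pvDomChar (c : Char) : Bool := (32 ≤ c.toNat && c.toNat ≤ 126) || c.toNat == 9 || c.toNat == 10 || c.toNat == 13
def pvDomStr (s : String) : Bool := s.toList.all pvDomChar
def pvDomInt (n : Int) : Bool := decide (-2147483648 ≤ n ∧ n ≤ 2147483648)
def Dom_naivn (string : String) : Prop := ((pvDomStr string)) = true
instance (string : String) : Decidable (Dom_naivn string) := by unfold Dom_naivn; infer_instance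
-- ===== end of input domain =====

-- B replaces A's 90 passes over the string (one per candidate pair) by a single pass building a
-- pair counter, followed by one running-max sweep over 10..99 (objective: faster).


-- ===== PORT A =====
-- max_dict: max of the values, then the first key holding it.  The two fallback branches mark
-- where Python would raise (max of an empty dict / max_key unbound); naivn never reaches them.
def maxDict (d : PySem.Dict Int Int) : Int × Int :=
  match PySem.List.max? d.values (fun v => v) with
  | none => (0, 0)
  | some m =>
    match d.items.find? (fun kv => kv.2 == m) with
    | some kv => (kv.1, m)
    | none => (0, m)

def naivn (string : String) : Int × Int :=
  let cs := string.toList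
  let d := (PySem.List.pyRange 10 100 1).foldl (fun d i =>
    let ds := PySem.Int.toChars i
    let a := PySem.List.pyGetD ds 0 ' '   -- str(i)[0]; in range: len(str(i)) = 2 for 10 ≤ i ≤ 99
    let b := PySem.List.pyGetD ds 1 ' '
    let c := (PySem.List.pyRange 1 (PySem.Str.len string) 1).foldl (fun c j =>
      if a = PySem.List.pyGetD cs (j - 1) ' ' ∧ b = PySem.List.pyGetD cs j ' ' then c + 1 else c)
      (0 : Int)
    d.insert i c) (PySem.Dict.empty)
  maxDict d

-- ===== PORT B =====
def naivn_alt (string : String) : Int × Int :=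
  let cs := string.toList
  let counts := (PySem.List.pyRange 1 (PySem.Str.len string) 1).foldl (fun d j =>
    let a := PySem.List.pyGetD cs (j - 1) ' '   -- j ∈ [1, len): both indices in range
    let b := PySem.List.pyGetD cs j ' '
    if ('1' ≤ a ∧ a ≤ '9') ∧ ('0' ≤ b ∧ b ≤ '9') then
      let p : Int := 10 * ((a.toNat : Int) - 48) + ((b.toNat : Int) - 48)
      d.insert p (d.getD p 0 + 1)
    else d) (PySem.Dict.empty : PySem.Dict Int Int)
  (PySem.List.pyRange 10 100 1).foldl (fun best i =>
    let c := counts.getD i 0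
    if c > best.2 then (i, c) else best) ((10 : Int), (0 : Int))

-- ===== PRECONDITION & SPEC =====
def Spec_naivn (string : String) (out : Int × Int) : Prop := out = naivn_alt string
instance (string : String) (out : Int × Int) : Decidable (Spec_naivn string out) := by unfold Spec_naivn; infer_instance

-- ===== CLAIM (what is proved, stated in full; the proofs are below) =====
def Claim_equal_naivn : Prop := ∀ (string : String), Dom_naivn string → Spec_naivn string (naivn string)

-- ===== LEMMAS AND PROOFS =====

-- A's inner loop: the count of adjacent occurrences of the two digits of i.
def cntA (s : String) (i : Int) : Int :=
  (PySem.List.pyRange 1 (PySem.Str.len s) 1).foldl (fun c j =>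
    if PySem.List.pyGetD (PySem.Int.toChars i) 0 ' ' = PySem.List.pyGetD s.toList (j - 1) ' ' ∧
       PySem.List.pyGetD (PySem.Int.toChars i) 1 ' ' = PySem.List.pyGetD s.toList j ' ' then c + 1 else c)
    (0 : Int)

-- B's encoded pair value at position j.
def pB (s : String) (j : Int) : Int :=
  10 * (((PySem.List.pyGetD s.toList (j - 1) ' ').toNat : Int) - 48) +
    (((PySem.List.pyGetD s.toList j ' ').toNat : Int) - 48)

-- B's counter (the first loop of naivn_alt).
def countsB (s : String) : PySem.Dict Int Int :=
  (PySem.List.pyRange 1 (PySem.Str.len s) 1).foldl (fun d j =>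
    if ('1' ≤ PySem.List.pyGetD s.toList (j - 1) ' ' ∧ PySem.List.pyGetD s.toList (j - 1) ' ' ≤ '9') ∧
       ('0' ≤ PySem.List.pyGetD s.toList j ' ' ∧ PySem.List.pyGetD s.toList j ' ' ≤ '9') then
      d.insert (pB s j) (d.getD (pB s j) 0 + 1)
    else d) PySem.Dict.empty

-- The common value of both programs: first key of 10..99 holding the maximal count.
def bestOf (g : Int → Int) : Int × Int :=
  let m := ((PySem.List.pyRange 11 100 1).map g).foldl max (g 10)
  match ((10, g 10) :: (PySem.List.pyRange 11 100 1).map fun i => (i, g i)).find? (fun kv => kv.2 == m) with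
  | some kv => (kv.1, m)
  | none => (0, m)

lemma hL10 : PySem.List.pyRange 10 100 1 = 10 :: PySem.List.pyRange 11 100 1 := by
  rw [PySem.List.pyRange_one_cons (by norm_num)]; norm_num

lemma char_le_iff (a b : Char) : a ≤ b ↔ a.toNat ≤ b.toNat := by
  simp [Char.le_def, UInt32.le_iff_toNat_le]

lemma char_eq_of_toNat {a b : Char} (h : a.toNat = b.toNat) : a = b := by
  apply Char.ext; exact UInt32.toNat_inj.mp h

lemma digit_facts : ∀ i ∈ PySem.List.pyRange 10 100 1,
    ('1' ≤ PySem.List.pyGetD (PySem.Int.toChars i) 0 ' ' ∧ PySem.List.pyGetD (PySem.Int.toChars i) 0 ' ' ≤ '9') ∧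
    ('0' ≤ PySem.List.pyGetD (PySem.Int.toChars i) 1 ' ' ∧ PySem.List.pyGetD (PySem.Int.toChars i) 1 ' ' ≤ '9') ∧
    10 * (((PySem.List.pyGetD (PySem.Int.toChars i) 0 ' ').toNat : Int) - 48) +
      (((PySem.List.pyGetD (PySem.Int.toChars i) 1 ' ').toNat : Int) - 48) = i := by decide

-- for i ∈ [10, 100): "(x, y) are exactly the two digit characters of i" ↔ B's test-and-encode.
lemma bridge (i : Int) (hi : i ∈ PySem.List.pyRange 10 100 1) (x y : Char) :
    (PySem.List.pyGetD (PySem.Int.toChars i) 0 ' ' = x ∧ PySem.List.pyGetD (PySem.Int.toChars i) 1 ' ' = y)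
    ↔ (('1' ≤ x ∧ x ≤ '9') ∧ ('0' ≤ y ∧ y ≤ '9') ∧
        10 * ((x.toNat : Int) - 48) + ((y.toNat : Int) - 48) = i) := by
  obtain ⟨⟨h1, h2⟩, ⟨h3, h4⟩, h5⟩ := digit_facts i hi
  constructor
  · rintro ⟨hx, hy⟩
    rw [← hx, ← hy]
    exact ⟨⟨h1, h2⟩, ⟨h3, h4⟩, h5⟩
  · rintro ⟨⟨hx1, hx2⟩, ⟨hy1, hy2⟩, hp⟩
    have b1 : 49 ≤ x.toNat := (char_le_iff '1' x).mp hx1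
    have b2 : x.toNat ≤ 57 := (char_le_iff x '9').mp hx2
    have b3 : 48 ≤ y.toNat := (char_le_iff '0' y).mp hy1
    have b4 : y.toNat ≤ 57 := (char_le_iff y '9').mp hy2
    have c1 : 49 ≤ (PySem.List.pyGetD (PySem.Int.toChars i) 0 ' ').toNat := (char_le_iff _ _).mp h1
    have c2 : (PySem.List.pyGetD (PySem.Int.toChars i) 0 ' ').toNat ≤ 57 := (char_le_iff _ _).mp h2
    have c3 : 48 ≤ (PySem.List.pyGetD (PySem.Int.toChars i) 1 ' ').toNat := (char_le_iff _ _).mp h3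
    have c4 : (PySem.List.pyGetD (PySem.Int.toChars i) 1 ' ').toNat ≤ 57 := (char_le_iff _ _).mp h4
    exact ⟨char_eq_of_toNat (by omega), char_eq_of_toNat (by omega)⟩

-- loop shapes specific to the two ports (Prop-conditioned ifs)
lemma foldl_if_filter {β : Type} {C : Int → Prop} [DecidablePred C] (f : β → Int → β) :
    ∀ (l : List Int) (d : β),
    l.foldl (fun d j => if C j then f d j else d) d = (l.filter (fun j => decide (C j))).foldl f d := by
  intro l
  induction l with
  | nil => intro d; rfl
  | cons x t ih =>
    intro d
    by_cases h : C x <;> simp [h, ih]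

lemma foldl_count_prop {C : Int → Prop} [DecidablePred C] :
    ∀ (l : List Int) (n : Int),
    l.foldl (fun c j => if C j then c + 1 else c) n = n + (l.countP (fun j => decide (C j)) : Int) := by
  intro l
  induction l with
  | nil => intro n; simp
  | cons x t ih =>
    intro n
    by_cases h : C x
    · simp [h, ih]
      ring
    · simp [h, ih]

lemma count_map_int (l : List Int) (f : Int → Int) (i : Int) :
    (l.map f).count i = l.countP (fun j => f j == i) := by
  induction l with
  | nil => rfl
  | cons x t ih => simp [List.count_cons, List.countP_cons, ih]

lemma foldl_map_arg {β : Type} (f : Int → Int) (g : β → Int → β) (l : List Int) (init : β) :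
    (l.map f).foldl g init = l.foldl (fun d j => g d (f j)) init := by
  induction l generalizing init with
  | nil => rfl
  | cons x t ih => simp [ih]

lemma cntA_nonneg (s : String) (i : Int) : 0 ≤ cntA s i := by
  rw [cntA, foldl_count_prop, zero_add]
  exact Int.natCast_nonneg _

-- B's counter agrees with A's per-candidate count on every candidate.
lemma getD_countsB (s : String) (i : Int) (hi : i ∈ PySem.List.pyRange 10 100 1) :
    (countsB s).getD i 0 = cntA s i := by
  have h1 : countsB s =
      (((PySem.List.pyRange 1 (PySem.Str.len s) 1).filter (fun j =>
          decide (('1' ≤ PySem.List.pyGetD s.toList (j - 1) ' ' ∧ PySem.List.pyGetD s.toList (j - 1) ' ' ≤ '9') ∧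
            ('0' ≤ PySem.List.pyGetD s.toList j ' ' ∧ PySem.List.pyGetD s.toList j ' ' ≤ '9')))).map (pB s)).foldl
        (fun d x => d.insert x (d.getD x 0 + 1)) PySem.Dict.empty := by
    rw [countsB, foldl_if_filter]
    exact (foldl_map_arg (pB s) (fun (d : PySem.Dict Int Int) (x : Int) => d.insert x (d.getD x 0 + 1)) _ _).symm
  rw [h1, PySem.Dict.getD_foldl_insert_add_one, PySem.Dict.getD_empty, count_map_int,
    List.countP_filter, cntA, foldl_count_prop, zero_add, zero_add]
  have hiff : ∀ j ∈ PySem.List.pyRange 1 (PySem.Str.len s) 1,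
      ((pB s j == i) &&
        decide (('1' ≤ PySem.List.pyGetD s.toList (j - 1) ' ' ∧ PySem.List.pyGetD s.toList (j - 1) ' ' ≤ '9') ∧
          ('0' ≤ PySem.List.pyGetD s.toList j ' ' ∧ PySem.List.pyGetD s.toList j ' ' ≤ '9'))) = true ↔
      (decide (PySem.List.pyGetD (PySem.Int.toChars i) 0 ' ' = PySem.List.pyGetD s.toList (j - 1) ' ' ∧
        PySem.List.pyGetD (PySem.Int.toChars i) 1 ' ' = PySem.List.pyGetD s.toList j ' ')) = true := by
    intro j _
    have hb := bridge i hi (PySem.List.pyGetD s.toList (j - 1) ' ') (PySem.List.pyGetD s.toList j ' ')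
    simp only [Bool.and_eq_true, beq_iff_eq, decide_eq_true_eq, pB]
    rw [hb]
    tauto
  exact_mod_cast congrArg Nat.cast (List.countP_congr hiff)

-- the selection loop of B computes "first key with the maximal value" — A's max_dict recipe.
lemma sel (g : Int → Int) : ∀ (L : List Int) (k v : Int),
    L.foldl (fun best i => if g i > best.2 then (i, g i) else best) (k, v) =
      (match ((k, v) :: L.map fun i => (i, g i)).find? (fun kv => kv.2 == (L.map g).foldl max v) with
       | some kv => (kv.1, (L.map g).foldl max v)
       | none => (0, (L.map g).foldl max v)) := by
  intro L
  induction L with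
  | nil =>
    intro k v
    simp [List.find?_cons_of_pos]
  | cons i T ih =>
    intro k v
    rw [List.foldl_cons, List.map_cons, List.map_cons, List.foldl_cons]
    by_cases h : g i > v
    · have hstep : (if g i > (k, v).2 then (i, g i) else (k, v)) = (i, g i) := by
        simp [h]
      rw [hstep, max_eq_right h.le, ih i (g i)]
      have h1 := (PySem.List.le_foldl_max (T.map g) (g i)).1
      have hdrop : List.find? (fun kv => kv.2 == (T.map g).foldl max (g i))
            ((k, v) :: (i, g i) :: T.map fun i => (i, g i))
          = List.find? (fun kv => kv.2 == (T.map g).foldl max (g i))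
            ((i, g i) :: T.map fun i => (i, g i)) :=
        List.find?_cons_of_neg (by simp; omega)
      rw [hdrop]
    · have hle : g i ≤ v := not_lt.mp h
      have hstep : (if g i > (k, v).2 then (i, g i) else (k, v)) = (k, v) := by
        simp [h]
      rw [hstep, max_eq_left hle, ih k v]
      have h1 := (PySem.List.le_foldl_max (T.map g) v).1
      by_cases hv : v = (T.map g).foldl max v
      · have hhit : ∀ (tl : List (Int × Int)), List.find? (fun kv => kv.2 == (T.map g).foldl max v) ((k, v) :: tl)
            = some (k, v) :=
          fun tl => List.find?_cons_of_pos (by simp [← hv])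
        rw [hhit, hhit]
      · have hd1 : List.find? (fun kv => kv.2 == (T.map g).foldl max v)
              ((k, v) :: T.map fun i => (i, g i))
            = List.find? (fun kv => kv.2 == (T.map g).foldl max v) (T.map fun i => (i, g i)) :=
          List.find?_cons_of_neg (by simp; omega)
        have hd2 : List.find? (fun kv => kv.2 == (T.map g).foldl max v)
              ((k, v) :: (i, g i) :: T.map fun i => (i, g i))
            = List.find? (fun kv => kv.2 == (T.map g).foldl max v)
              ((i, g i) :: T.map fun i => (i, g i)) :=
          List.find?_cons_of_neg (by simp; omega)
        have hd3 : List.find? (fun kv => kv.2 == (T.map g).foldl max v)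
              ((i, g i) :: T.map fun i => (i, g i))
            = List.find? (fun kv => kv.2 == (T.map g).foldl max v) (T.map fun i => (i, g i)) :=
          List.find?_cons_of_neg (by simp; omega)
        rw [hd1, hd2, hd3]

lemma A_eq (s : String) : naivn s = bestOf (cntA s) := by
  have h0 : naivn s =
      maxDict ((PySem.List.pyRange 10 100 1).foldl (fun d i => d.insert i (cntA s i)) PySem.Dict.empty) := rfl
  have hitems : ((PySem.List.pyRange 10 100 1).foldl (fun d i => d.insert i (cntA s i)) PySem.Dict.empty).items
      = (PySem.List.pyRange 10 100 1).map (fun i => (i, cntA s i)) := by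
    have h := PySem.Dict.items_foldl_insert_fresh (PySem.List.pyRange 10 100 1)
      (fun i => i) (fun i => cntA s i) PySem.Dict.empty
      (fun a _ => by simp [PySem.Dict.contains_empty])
      (by simpa using PySem.List.nodup_pyRange_one (a := 10) (b := 100))
    simpa using h
  have hvals : ((PySem.List.pyRange 10 100 1).foldl (fun d i => d.insert i (cntA s i)) PySem.Dict.empty).values
      = (PySem.List.pyRange 10 100 1).map (fun i => cntA s i) := by
    have hv : ((PySem.List.pyRange 10 100 1).foldl (fun d i => d.insert i (cntA s i)) PySem.Dict.empty).values
        = ((PySem.List.pyRange 10 100 1).foldl (fun d i => d.insert i (cntA s i)) PySem.Dict.empty).items.map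
            (fun p => p.2) := rfl
    rw [hv, hitems, List.map_map]
    rfl
  rw [h0]
  simp only [maxDict]
  rw [hvals, hitems, hL10]
  simp only [List.map_cons]
  rw [PySem.List.max?_id_cons]
  rfl

lemma B_eq (s : String) : naivn_alt s = bestOf (cntA s) := by
  have h0 : naivn_alt s = (PySem.List.pyRange 10 100 1).foldl
      (fun best i => if (countsB s).getD i 0 > best.2 then (i, (countsB s).getD i 0) else best)
      ((10 : Int), (0 : Int)) := rfl
  have h1 : (PySem.List.pyRange 10 100 1).foldl
      (fun best i => if (countsB s).getD i 0 > best.2 then (i, (countsB s).getD i 0) else best)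
      ((10 : Int), (0 : Int))
      = (PySem.List.pyRange 10 100 1).foldl
        (fun best i => if cntA s i > best.2 then (i, cntA s i) else best) ((10 : Int), (0 : Int)) :=
    PySem.List.foldl_congr_mem _ _ _ _ (fun acc i hi => by rw [getD_countsB s i hi])
  rw [h0, h1, hL10, List.foldl_cons]
  have hstep : (if cntA s 10 > (((10 : Int), (0 : Int)) : Int × Int).2 then ((10 : Int), cntA s 10) else (10, 0)) = (10, cntA s 10) := by
    by_cases h : cntA s 10 > 0
    · simp [h]
    · have h0' : cntA s 10 = 0 := le_antisymm (not_lt.mp h) (cntA_nonneg s 10)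
      simp [h0']
  rw [hstep, sel (cntA s) (PySem.List.pyRange 11 100 1) 10 (cntA s 10)]
  rfl

-- ===== VERDICT (by name: the statement is the Claim_ definition above) =====
theorem naivn_spec : Claim_equal_naivn := by
  intro string _
  unfold Spec_naivn
  rw [A_eq, B_eq]
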